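-- pv_equiv track=rewrite | github.com/ivanillera/TP1Sintaxis | Lexer.py | a_for
-- ===== SOURCE A (Python) =====
-- TRAMPA = -1
--
-- RESULTADO_ACEPTADO = "ACEPTADO"
--
-- RESULTADO_TRAMPA = "TRAMPA"
--
-- RESULTADO_NO_ACEPTADO = "NO_ACEPTADO"
--
-- def d_for(estado_anterior, caracter):
-- 	if estado_anterior == 0 and caracter == "f":
-- 		return 1
-- 	if estado_anterior == 1 and caracter == "o":
-- 		return 2
-- 	if estado_anterior == 2 and caracter == "r":
-- 		return 3
--
--
-- 	return RESULTADO_TRAMPA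
--
-- def a_for(cadena):
-- 	Finales = [3]
-- 	estado_actual = 0
--
-- 	for caracter in cadena:
-- 		estado_proximo = d_for(estado_actual, caracter)
-- 		if estado_proximo == TRAMPA:
-- 			return RESULTADO_TRAMPA
-- 		estado_actual = estado_proximo
--
-- 	if estado_actual in Finales:
-- 		return RESULTADO_ACEPTADO
-- 	else:
-- 		return RESULTADO_NO_ACEPTADO
-- ===== SOURCE B (Python) =====
-- RESULTADO_ACEPTADO = "ACEPTADO"
-- RESULTADO_NO_ACEPTADO = "NO_ACEPTADO"
--
-- def a_for(cadena):
--     # Closed-form check: A's DFA (with its dead trap branch) accepts exactly the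
--     # character sequence 'f','o','r'. Materialise via list() so any iterable works.
--     return RESULTADO_ACEPTADO if list(cadena) == ["f", "o", "r"] else RESULTADO_NO_ACEPTADO
-- ===== Notes on version B (the rewrite author's own statement) =====
-- stated objective: simpler
-- what changed: Replaces the DFA transition loop (whose trap branch is dead: d_for returns the string "TRAMPA" but the loop compares it with the int -1) by a closed-form comparison of the input's character list with ['f','o','r'].
import Mathlib
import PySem

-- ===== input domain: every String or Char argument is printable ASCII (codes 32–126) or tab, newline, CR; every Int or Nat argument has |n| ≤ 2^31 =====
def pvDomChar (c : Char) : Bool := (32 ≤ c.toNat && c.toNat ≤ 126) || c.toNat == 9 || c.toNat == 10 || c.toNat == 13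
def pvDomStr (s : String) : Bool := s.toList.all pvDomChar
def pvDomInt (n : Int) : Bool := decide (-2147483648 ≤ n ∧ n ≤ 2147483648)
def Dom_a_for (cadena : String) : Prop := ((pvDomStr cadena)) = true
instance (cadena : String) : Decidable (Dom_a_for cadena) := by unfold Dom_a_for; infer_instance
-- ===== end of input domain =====

-- B replaces A's DFA loop by a closed-form comparison with the char list ['f','o','r'] (objective: simpler).

-- ===== PORT A =====
-- Python's dynamic state: d_for's fall-through returns the STRING "TRAMPA" while the
-- loop compares the next state with the INT -1, so the state is int-or-string.
inductive PyV where
  | int : Int → PyV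
  | str : String → PyV
deriving DecidableEq

def d_for (estado_anterior : PyV) (caracter : Char) : PyV :=
  if estado_anterior = PyV.int 0 ∧ caracter = 'f' then PyV.int 1
  else if estado_anterior = PyV.int 1 ∧ caracter = 'o' then PyV.int 2
  else if estado_anterior = PyV.int 2 ∧ caracter = 'r' then PyV.int 3
  else PyV.str "TRAMPA"

def a_for_loop (estado_actual : PyV) (cs : List Char) : String :=
  match cs with
  | [] => if estado_actual ∈ [PyV.int 3] then "ACEPTADO" else "NO_ACEPTADO"
  | c :: rest =>
      let estado_proximo := d_for estado_actual c
      if estado_proximo = PyV.int (-1) then "TRAMPA"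
      else a_for_loop estado_proximo rest

def a_for (cadena : String) : String := a_for_loop (PyV.int 0) cadena.toList

-- ===== PORT B =====
def a_for_alt (cadena : String) : String :=
  if cadena.toList = ['f', 'o', 'r'] then "ACEPTADO" else "NO_ACEPTADO"

-- ===== PRECONDITION & SPEC =====
def Spec_a_for (cadena : String) (out : String) : Prop := out = a_for_alt cadena
instance (cadena : String) (out : String) : Decidable (Spec_a_for cadena out) := by unfold Spec_a_for; infer_instance

-- ===== CLAIM (what is proved, stated in full; the proofs are below) =====
def Claim_equal_a_for : Prop := ∀ (cadena : String), Dom_a_for cadena → Spec_a_for cadena (a_for cadena)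

-- ===== LEMMAS AND PROOFS =====

-- once trapped (state is a string), d_for keeps returning the string trap state,
-- it never equals the int -1, and the final state is not the int 3
theorem a_for_loop_trap (s : String) (cs : List Char) :
    a_for_loop (PyV.str s) cs = "NO_ACEPTADO" := by
  induction cs generalizing s with
  | nil => simp [a_for_loop]
  | cons c rest ih => simp [a_for_loop, d_for]; exact ih "TRAMPA"

theorem a_for_loop_three (cs : List Char) :
    a_for_loop (PyV.int 3) cs = if cs = [] then "ACEPTADO" else "NO_ACEPTADO" := by
  cases cs with
  | nil => simp [a_for_loop]
  | cons c rest => simp [a_for_loop, d_for, a_for_loop_trap]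

-- ===== VERDICT (by name: the statement is the Claim_ definition above) =====
theorem a_for_spec : Claim_equal_a_for := by
  intro cadena _
  unfold Spec_a_for a_for a_for_alt
  cases h : cadena.toList with
  | nil => simp [a_for_loop]
  | cons c rest =>
    by_cases hc : c = 'f'
    · subst hc
      cases rest with
      | nil => simp [a_for_loop, d_for]
      | cons c2 rest2 =>
        by_cases h2 : c2 = 'o'
        · subst h2
          cases rest2 with
          | nil => simp [a_for_loop, d_for]
          | cons c3 rest3 =>
            by_cases h3 : c3 = 'r'
            · subst h3
              simp [a_for_loop, d_for, a_for_loop_three]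
            · simp [a_for_loop, d_for, h3, a_for_loop_trap]
        · simp [a_for_loop, d_for, h2, a_for_loop_trap]
    · simp [a_for_loop, d_for, hc, a_for_loop_trap]
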